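-- pv_equiv track=rewrite | github.com/jewalky/demostats | data.py | V_ColorizeString
-- ===== SOURCE A (Python) =====
-- def V_ColorizeString(instr):
--     outstr = ''
--     i = -1
--     while i+1 < len(instr):
--         i += 1
--         c = instr[i]
--         if c == '\\' and i+1 < len(instr):
--             outstr += '\034'
--             i += 1
--             continue
--         outstr += c
--     return outstr
-- ===== SOURCE B (Python) =====
-- import re
--
-- def V_ColorizeString(instr):
--     return re.sub(r'\\.', '\034', instr, flags=re.DOTALL)
-- ===== Notes on version B (the rewrite author's own statement) =====
-- stated objective: idiomatic
-- what changed: Replaces the hand-written index loop with quadratic string concatenation by a single re.sub of the pattern \\. (DOTALL) with the control char '\034'; no explicit loop or index remains.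
import Mathlib
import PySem

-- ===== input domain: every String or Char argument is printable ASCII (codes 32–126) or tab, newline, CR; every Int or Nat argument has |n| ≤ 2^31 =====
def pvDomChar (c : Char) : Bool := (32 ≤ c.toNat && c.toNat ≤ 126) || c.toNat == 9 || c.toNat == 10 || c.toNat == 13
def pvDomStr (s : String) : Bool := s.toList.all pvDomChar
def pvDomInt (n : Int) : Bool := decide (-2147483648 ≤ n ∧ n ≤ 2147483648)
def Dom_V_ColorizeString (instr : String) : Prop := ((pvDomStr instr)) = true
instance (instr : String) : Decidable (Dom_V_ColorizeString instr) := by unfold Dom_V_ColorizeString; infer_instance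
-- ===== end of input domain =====

-- B replaces A's hand-written index loop by a single regex substitution (re.sub of '\\.' with '\034'); equal return value, idiomatic rewrite.

-- ===== PORT A =====
-- A's while loop: i is the scan index (here ported as a Nat cursor; A's i+1 ≡ this i),
-- outstr the accumulated output; on '\' with a following char append '\034' and skip it.
def V_ColorizeString_loop (s : List Char) (i : Nat) (outstr : List Char) : List Char :=
  if h : i < s.length then
    let c := s[i]
    if c = '\\' ∧ i + 1 < s.length then
      V_ColorizeString_loop s (i + 2) (outstr ++ ['\x1C'])
    else
      V_ColorizeString_loop s (i + 1) (outstr ++ [c])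
  else outstr
termination_by s.length - i

def V_ColorizeString (instr : String) : String :=
  String.ofList (V_ColorizeString_loop instr.toList 0 [])

-- ===== PORT B =====
-- re.sub(r'\\.', '\034', instr, flags=re.DOTALL): left-to-right non-overlapping matching
-- of 'backslash followed by any one char', each match replaced by the single char '\034'.
def reSubEscape : List Char → List Char
  | [] => []
  | '\\' :: _ :: t => '\x1C' :: reSubEscape t
  | c :: t => c :: reSubEscape t

def V_ColorizeString_alt (instr : String) : String :=
  String.ofList (reSubEscape instr.toList)

-- ===== PRECONDITION & SPEC =====
def Spec_V_ColorizeString (instr : String) (out : String) : Prop := out = V_ColorizeString_alt instr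
instance (instr : String) (out : String) : Decidable (Spec_V_ColorizeString instr out) := by unfold Spec_V_ColorizeString; infer_instance

-- ===== CLAIM (what is proved, stated in full; the proofs are below) =====
def Claim_equal_V_ColorizeString : Prop := ∀ (instr : String), Dom_V_ColorizeString instr → Spec_V_ColorizeString instr (V_ColorizeString instr)

-- ===== LEMMAS AND PROOFS =====

lemma reSubEscape_nil : reSubEscape [] = [] := rfl

lemma reSubEscape_esc (d : Char) (t : List Char) :
    reSubEscape ('\\' :: d :: t) = '\x1C' :: reSubEscape t := rfl

lemma reSubEscape_single (c : Char) : reSubEscape [c] = [c] := by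
  rw [reSubEscape.eq_def]
  split <;> simp_all [reSubEscape]

lemma reSubEscape_cons (c : Char) (t : List Char) (h : c ≠ '\\') :
    reSubEscape (c :: t) = c :: reSubEscape t := by
  rw [reSubEscape.eq_def]
  split <;> simp_all

lemma V_ColorizeString_loop_eq (n : Nat) :
    ∀ (s : List Char) (i : Nat) (out : List Char), s.length - i ≤ n →
      V_ColorizeString_loop s i out = out ++ reSubEscape (s.drop i) := by
  induction n with
  | zero =>
    intro s i out h
    have hi : ¬ i < s.length := by omega
    rw [V_ColorizeString_loop, dif_neg hi, List.drop_eq_nil_of_le (by omega), reSubEscape_nil,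
      List.append_nil]
  | succ n ih =>
    intro s i out h
    rw [V_ColorizeString_loop]
    by_cases hi : i < s.length
    · rw [dif_pos hi]
      have hdrop : s.drop i = s[i] :: s.drop (i + 1) := List.drop_eq_getElem_cons hi
      by_cases hc : s[i] = '\\' ∧ i + 1 < s.length
      · rw [if_pos hc]
        have hdrop2 : s.drop (i + 1) = s[i + 1] :: s.drop (i + 2) :=
          List.drop_eq_getElem_cons hc.2
        rw [ih s (i + 2) _ (by omega), hdrop, hdrop2, hc.1, reSubEscape_esc]
        simp
      · rw [if_neg hc]
        rw [ih s (i + 1) _ (by omega), hdrop]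
        by_cases hb : s[i] = '\\'
        · have hnil : s.drop (i + 1) = [] := by
            have : ¬ i + 1 < s.length := fun hlt => hc ⟨hb, hlt⟩
            exact List.drop_eq_nil_of_le (by omega)
          rw [hnil, reSubEscape_single]
          all_goals simp [reSubEscape]
        · rw [reSubEscape_cons _ _ hb]
          simp
    · rw [dif_neg hi, List.drop_eq_nil_of_le (by omega), reSubEscape_nil, List.append_nil]

-- ===== VERDICT (by name: the statement is the Claim_ definition above) =====
theorem V_ColorizeString_spec : Claim_equal_V_ColorizeString := by
  intro instr _
  show String.ofList (V_ColorizeString_loop instr.toList 0 []) = _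
  rw [V_ColorizeString_loop_eq (instr.toList.length) instr.toList 0 [] (by omega)]
  rfl
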